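-- pv_equiv track=rewrite | github.com/Trishank1808/DSA | 3567-minimum-absolute-difference-in-sliding-submatrix/3567-minimum-absolute-difference-in-sliding-submatrix.py | minAbsDiff
-- ===== SOURCE A (Python) =====
-- from typing import List
--
-- def minAbsDiff(grid: List[List[int]], k: int) -> List[List[int]]:
--     m, n = len(grid), len(grid[0])
--     res = []
--     for i in range(m - k + 1):
--         row = []
--         for j in range(n - k + 1):
--             arr = set()
--             for x in range(i, i + k):
--                 for y in range(j, j + k):
--                     arr.add(grid[x][y])
--             arr = sorted(arr)
--             if len(arr) == 1:
--                 row.append(0)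
--             else:
--                 mn = float('inf')
--                 for t in range(1, len(arr)):
--                     mn = min(mn, arr[t] - arr[t-1])
--                 row.append(mn)
--
--         res.append(row)
--
--     return res
-- ===== SOURCE B (Python) =====
-- from typing import List
--
-- def minAbsDiff(grid: List[List[int]], k: int) -> List[List[int]]:
--     m, n = len(grid), len(grid[0])
--
--     def cell(i, j):
--         vals = set()
--         for r in grid[i:i + k]:
--             vals.update(r[j:j + k])
--         # min gap of distinct values = min positive pairwise difference; no sorting
--         return min((b - a for a in vals for b in vals if a < b), default=0)
--
--     return [[cell(i, j) for j in range(n - k + 1)] for i in range(m - k + 1)]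
-- ===== Notes on version B (the rewrite author's own statement) =====
-- stated objective: alternative
-- what changed: Per window B collects the distinct values into a set (updated from row slices) and returns the minimum pairwise difference b-a over pairs a<b directly (no sorting, no adjacent-gap scan), where A builds the set element by element, sorts it and scans adjacent differences.
-- outside the precondition, e.g. on minAbsDiff([[1]], 0): A returns [[inf, inf], [inf, inf]], B returns [[0, 0], [0, 0]]
import Mathlib
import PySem

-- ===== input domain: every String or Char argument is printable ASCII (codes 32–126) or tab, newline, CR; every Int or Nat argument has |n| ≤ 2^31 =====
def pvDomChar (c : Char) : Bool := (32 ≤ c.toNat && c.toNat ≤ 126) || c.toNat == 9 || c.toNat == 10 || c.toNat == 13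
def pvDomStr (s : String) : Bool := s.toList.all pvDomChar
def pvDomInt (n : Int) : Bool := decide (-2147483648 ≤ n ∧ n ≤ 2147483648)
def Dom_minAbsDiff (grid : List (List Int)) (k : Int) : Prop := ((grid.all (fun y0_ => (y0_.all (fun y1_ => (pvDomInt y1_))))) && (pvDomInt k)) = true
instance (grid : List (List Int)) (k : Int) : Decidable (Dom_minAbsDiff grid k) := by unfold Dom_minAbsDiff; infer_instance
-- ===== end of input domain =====

-- B replaces A's per-window sort-and-adjacent-scan of the distinct values by a direct minimum
-- pairwise difference (min of b - a over pairs a < b of the window's value set); no sorting.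


-- ===== PORT A =====
-- 'mn = float('inf'); mn = min(mn, v)': the accumulator is inf only before the first min,
-- so an Option Int accumulator (none = inf) is exact; under Pre_ the loop body runs at least
-- once whenever its result is appended, so the final '.getD 0' never stands in for A's inf.
def pvMinOpt (mn : Option Int) (v : Int) : Option Int :=
  match mn with
  | none => some v
  | some m => some (min m v)

-- 'if len(arr)==1: 0 else: for t in range(1, len(arr)): mn = min(mn, arr[t] - arr[t-1])'
-- (arr[t] via pyGetD: indices 1..len-1 are always in range)
def pvAInner (arr : List Int) : Int :=
  if arr.length == 1 then 0
  else
    ((PySem.List.pyRange 1 (PySem.List.len arr) 1).foldl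
      (fun mn t => pvMinOpt mn (PySem.List.pyGetD arr t 0 - PySem.List.pyGetD arr (t - 1) 0))
      none).getD 0

-- 'arr = set(); for x in range(i, i+k): for y in range(j, j+k): arr.add(grid[x][y])'
-- (grid[x][y] via pyGetD: in range on every input Pre_ admits)
def pvAWindow (grid : List (List Int)) (i j k : Int) : PySem.Set Int :=
  (PySem.List.pyRange i (i + k) 1).foldl
    (fun arr x =>
      (PySem.List.pyRange j (j + k) 1).foldl
        (fun arr y => PySem.Set.add arr (PySem.List.pyGetD (PySem.List.pyGetD grid x []) y 0))
        arr)
    PySem.Set.empty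

def minAbsDiff (grid : List (List Int)) (k : Int) : List (List Int) :=
  let m : Int := PySem.List.len grid
  let n : Int := PySem.List.len (grid.headD [])
  (PySem.List.pyRange 0 (m - k + 1) 1).foldl
    (fun res i =>
      res ++ [(PySem.List.pyRange 0 (n - k + 1) 1).foldl
        (fun row j =>
          let arr := PySem.List.sorted (pvAWindow grid i j k) (fun v => v) false
          row ++ [pvAInner arr])
        []])
    []

-- ===== PORT B =====
-- cell(i, j): 'vals = set(); for r in grid[i:i+k]: vals.update(r[j:j+k]);
-- return min((b - a for a in vals for b in vals if a < b), default=0)'.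
-- The min over the pair generator is a value of the set of pairwise differences, independent
-- of Python's set iteration order, so iterating the PySem.Set in insertion order is exact.
def pvCellB (grid : List (List Int)) (k i j : Int) : Int :=
  let vals : PySem.Set Int :=
    (PySem.List.slice grid (some i) (some (i + k))).foldl
      (fun s r => PySem.Set.update s (PySem.List.slice r (some j) (some (j + k))))
      PySem.Set.empty
  PySem.List.minD
    (vals.flatMap (fun a => vals.filterMap (fun b => if a < b then some (b - a) else none)))
    (fun v => v) 0

def minAbsDiff_alt (grid : List (List Int)) (k : Int) : List (List Int) :=
  let m : Int := PySem.List.len grid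
  let n : Int := PySem.List.len (grid.headD [])
  (PySem.List.pyRange 0 (m - k + 1) 1).map
    (fun i => (PySem.List.pyRange 0 (n - k + 1) 1).map (fun j => pvCellB grid k i j))

-- ===== PRECONDITION & SPEC =====
-- Pre_ excludes: the empty grid (grid[0] raises IndexError); k ≤ 0, where A appends
-- float('inf') — not an int; and, when windows exist (k ≤ both dimensions), ragged grids
-- with an accessed row shorter than the first row (grid[x][y] raises IndexError).
def Pre_minAbsDiff (grid : List (List Int)) (k : Int) : Prop :=
  grid ≠ [] ∧ 1 ≤ k ∧
    (k ≤ (grid.length : Int) ∧ k ≤ ((grid.headD []).length : Int) →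
      ∀ row ∈ grid, (grid.headD []).length ≤ row.length)
instance (grid : List (List Int)) (k : Int) : Decidable (Pre_minAbsDiff grid k) := by
  unfold Pre_minAbsDiff; infer_instance
def pvWitness_minAbsDiff : List (List Int) × Int := ([[1, 3], [7, 2]], 2)

def Spec_minAbsDiff (grid : List (List Int)) (k : Int) (out : List (List Int)) : Prop := out = minAbsDiff_alt grid k
instance (grid : List (List Int)) (k : Int) (out : List (List Int)) : Decidable (Spec_minAbsDiff grid k out) := by unfold Spec_minAbsDiff; infer_instance

-- ===== CLAIM (what is proved, stated in full; the proofs are below) =====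
def Claim_equal_minAbsDiff : Prop := ∀ (grid : List (List Int)) (k : Int), Dom_minAbsDiff grid k → Pre_minAbsDiff grid k → Spec_minAbsDiff grid k (minAbsDiff grid k)

-- ===== LEMMAS AND PROOFS =====

-- the adjacent-gap list of a list
def pvGaps (l : List Int) : List Int := (l.zip l.tail).map (fun p => p.2 - p.1)

theorem pvGaps_cons (a b : Int) (t : List Int) :
    pvGaps (a :: b :: t) = (b - a) :: pvGaps (b :: t) := by
  simp [pvGaps]

-- A's pyRange-indexed difference list IS the adjacent-gap list
theorem pvRange_map_gaps (arr : List Int) :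
    (PySem.List.pyRange 1 (PySem.List.len arr) 1).map
      (fun t => PySem.List.pyGetD arr t 0 - PySem.List.pyGetD arr (t - 1) 0) = pvGaps arr := by
  rw [PySem.List.pyRange_one]
  simp only [PySem.List.len_eq]
  apply List.ext_getElem
  · simp [pvGaps]
  · intro u h1 h2
    simp only [List.getElem_map, List.getElem_range, pvGaps]
    have hu : u + 1 < arr.length := by
      simp at h1; omega
    have e1 : (1 : Int) + (u : Int) = ((u + 1 : Nat) : Int) := by omega
    have e2 : (1 : Int) + (u : Int) - 1 = ((u : Nat) : Int) := by omega
    rw [e2, e1, PySem.List.pyGetD_natCast, PySem.List.pyGetD_natCast]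
    simp [List.getD_eq_getElem?_getD, List.getElem?_eq_getElem hu,
      List.getElem?_eq_getElem (by omega : u < arr.length), List.getElem_zip, List.getElem_tail]

theorem pvAInner_fold (arr : List Int) :
    ((PySem.List.pyRange 1 (PySem.List.len arr) 1).foldl
      (fun mn t => pvMinOpt mn (PySem.List.pyGetD arr t 0 - PySem.List.pyGetD arr (t - 1) 0))
      none) = (pvGaps arr).foldl pvMinOpt none := by
  rw [← pvRange_map_gaps arr, List.foldl_map]

-- the 'len(arr) == 1' branch coincides with the empty-gap fold, so A's inner value is one formula
theorem pvAInner_eq (arr : List Int) :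
    pvAInner arr = ((pvGaps arr).foldl pvMinOpt none).getD 0 := by
  unfold pvAInner
  rw [pvAInner_fold]
  split
  · next h =>
    obtain ⟨a, rfl⟩ := List.length_eq_one_iff.mp (by simpa using h)
    simp [pvGaps]
  · rfl

-- the Option-min fold with a some start is the plain running min
theorem pvMinOpt_foldl_some (t : List Int) (m : Int) :
    t.foldl pvMinOpt (some m) = some (t.foldl min m) := by
  induction t generalizing m with
  | nil => rfl
  | cons d t ih => simp [pvMinOpt, ih]

-- B's pair-difference list, membership characterisation
theorem pvMem_pairDiffs (S : List Int) (x : Int) :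
    x ∈ S.flatMap (fun a => S.filterMap (fun b => if a < b then some (b - a) else none))
      ↔ ∃ a ∈ S, ∃ b ∈ S, a < b ∧ x = b - a := by
  simp only [List.mem_flatMap, List.mem_filterMap]
  constructor
  · rintro ⟨a, ha, b, hb, hsome⟩
    split at hsome
    · next hab => exact ⟨a, ha, b, hb, hab, (Option.some_inj.mp hsome).symm⟩
    · cases hsome
  · rintro ⟨a, ha, b, hb, hab, rfl⟩
    exact ⟨a, ha, b, hb, by simp [hab]⟩

-- every adjacent gap of a strictly increasing list is a pair difference of its members
theorem pvGaps_mem_pairs (L : List Int) (h : L.Pairwise (· < ·)) (g : Int) (hg : g ∈ pvGaps L) :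
    ∃ a ∈ L, ∃ b ∈ L, a < b ∧ g = b - a := by
  induction L with
  | nil => simp [pvGaps] at hg
  | cons x t ih =>
    cases t with
    | nil => simp [pvGaps] at hg
    | cons y u =>
      rw [pvGaps_cons] at hg
      have ht := (List.pairwise_cons.mp h).2
      rcases List.mem_cons.mp hg with rfl | hg'
      · exact ⟨x, by simp, y, by simp, (List.pairwise_cons.mp h).1 y (by simp), rfl⟩
      · obtain ⟨a, ha, b, hb, hab, rfl⟩ := ih ht hg'
        exact ⟨a, by simp [ha], b, by simp [hb], hab, rfl⟩

-- every pair difference of a strictly increasing list dominates some adjacent gap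
theorem pvPair_ge_gap (L : List Int) (h : L.Pairwise (· < ·)) (a b : Int)
    (ha : a ∈ L) (hb : b ∈ L) (hab : a < b) :
    ∃ g ∈ pvGaps L, g ≤ b - a := by
  induction L with
  | nil => simp at ha
  | cons x t ih =>
    cases t with
    | nil =>
      simp at ha hb
      omega
    | cons y u =>
      have ht := (List.pairwise_cons.mp h).2
      have hall := (List.pairwise_cons.mp h).1
      rcases List.mem_cons.mp ha with rfl | ha'
      · -- a = x: the gap y - x works, since y ≤ b
        have hb' : b ∈ y :: u := by
          rcases List.mem_cons.mp hb with rfl | h'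
          · omega
          · exact h'
        have hyb : y ≤ b := by
          rcases List.mem_cons.mp hb' with rfl | h'
          · exact le_refl b
          · exact le_of_lt ((List.pairwise_cons.mp ht).1 b h')
        exact ⟨y - a, by rw [pvGaps_cons]; simp, by omega⟩
      · -- a in the tail: so is b, use the IH; gaps of the tail are gaps of the whole
        have hxa : x < a := hall a ha'
        have hb' : b ∈ y :: u := by
          rcases List.mem_cons.mp hb with rfl | h'
          · omega
          · exact h'
        obtain ⟨g, hg, hgle⟩ := ih ht ha' hb'
        exact ⟨g, by rw [pvGaps_cons]; exact List.mem_cons_of_mem _ hg, hgle⟩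

-- per-window core: A's sorted-adjacent minimum equals B's pairwise minimum, for any list S
-- with the same members as the strictly increasing L
theorem pvCore (S L : List Int) (hmem : ∀ x, x ∈ L ↔ x ∈ S) (hstrict : L.Pairwise (· < ·)) :
    pvAInner L
      = PySem.List.minD
          (S.flatMap (fun a => S.filterMap (fun b => if a < b then some (b - a) else none)))
          (fun v => v) 0 := by
  rw [pvAInner_eq]
  set P := S.flatMap (fun a => S.filterMap (fun b => if a < b then some (b - a) else none)) with hP
  have hPmem : ∀ x, x ∈ P ↔ ∃ a ∈ L, ∃ b ∈ L, a < b ∧ x = b - a := by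
    intro x
    rw [hP, pvMem_pairDiffs]
    constructor
    · rintro ⟨a, ha, b, hb, hab, rfl⟩
      exact ⟨a, (hmem a).mpr ha, b, (hmem b).mpr hb, hab, rfl⟩
    · rintro ⟨a, ha, b, hb, hab, rfl⟩
      exact ⟨a, (hmem a).mp ha, b, (hmem b).mp hb, hab, rfl⟩
  match hL : L, hstrict with
  | [], _ =>
    have hPnil : P = [] := by
      cases hcase : P with
      | nil => rfl
      | cons p q =>
        obtain ⟨a, ha, _⟩ := (hPmem p).mp (by rw [hcase]; simp)
        simp at ha
    rw [hPnil]
    simp [pvGaps, PySem.List.minD, PySem.List.min?]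
  | [v], _ =>
    have hPnil : P = [] := by
      cases hcase : P with
      | nil => rfl
      | cons p q =>
        obtain ⟨a, ha, b, hb, hab, _⟩ := (hPmem p).mp (by rw [hcase]; simp)
        simp at ha hb
        omega
    rw [hPnil]
    simp [pvGaps, PySem.List.minD, PySem.List.min?]
  | x :: y :: u, hstrict =>
    -- gaps nonempty; gmin = running min of the gaps
    rw [pvGaps_cons, List.foldl_cons]
    show ((pvGaps (y :: u)).foldl pvMinOpt (pvMinOpt none (y - x))).getD 0 = _
    rw [show pvMinOpt none (y - x) = some (y - x) from rfl, pvMinOpt_foldl_some]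
    set gmin := (pvGaps (y :: u)).foldl min (y - x) with hgmin
    have hgmem : gmin ∈ pvGaps (x :: y :: u) := by
      rw [pvGaps_cons]
      rcases PySem.List.foldl_min_mem (pvGaps (y :: u)) (y - x) with h | h
      · rw [hgmin, h]; simp
      · exact List.mem_cons_of_mem _ h
    have hgle : ∀ g ∈ pvGaps (x :: y :: u), gmin ≤ g := by
      intro g hg
      rw [pvGaps_cons] at hg
      rcases List.mem_cons.mp hg with rfl | h
      · exact (PySem.List.foldl_min_le (pvGaps (y :: u)) (y - x)).1
      · exact (PySem.List.foldl_min_le (pvGaps (y :: u)) (y - x)).2 g h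
    -- gmin is itself a pair difference, so P is nonempty
    have hgP : gmin ∈ P := by
      obtain ⟨a, ha, b, hb, hab, heq⟩ := pvGaps_mem_pairs _ hstrict gmin hgmem
      exact (hPmem gmin).mpr ⟨a, ha, b, hb, hab, heq⟩
    -- and gmin is a lower bound of P
    have hglow : ∀ p ∈ P, gmin ≤ p := by
      intro p hp
      obtain ⟨a, ha, b, hb, hab, rfl⟩ := (hPmem p).mp hp
      obtain ⟨g, hg, hgle'⟩ := pvPair_ge_gap _ hstrict a b ha hb hab
      exact le_trans (hgle g hg) hgle'
    -- minD of a nonempty list is its first minimal element; identify it with gmin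
    cases hmin : PySem.List.min? P (fun v : Int => v) with
    | none =>
      rw [PySem.List.min?_eq_none_iff] at hmin
      rw [hmin] at hgP
      simp at hgP
    | some pmin =>
      have h1 : pmin ≤ gmin := PySem.List.min?_isMin hmin gmin hgP
      have h2 : gmin ≤ pmin := hglow pmin (PySem.List.min?_mem hmin)
      simp [PySem.List.minD, hmin]
      omega

-- 'range(b, b+kn)' indexing is the slice r[b:b+kn]
theorem pvSeg {α : Type} (r : List α) (d : α) :
    ∀ (kn b : Nat), b + kn ≤ r.length →
      (PySem.List.pyRange (b : Int) ((b : Int) + (kn : Int)) 1).map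
        (fun y => PySem.List.pyGetD r y d) = (r.drop b).take kn := by
  intro kn
  induction kn with
  | zero =>
    intro b h
    simp [PySem.List.pyRange_one_eq_nil]
  | succ kn ih =>
    intro b h
    have hb : b < r.length := by omega
    have hcons : PySem.List.pyRange (b : Int) ((b : Int) + ((kn : Nat) + 1 : Nat)) 1
        = (b : Int) :: PySem.List.pyRange ((b : Int) + 1) ((b : Int) + ((kn : Nat) + 1 : Nat)) 1 := by
      apply PySem.List.pyRange_one_cons
      push_cast; omega
    rw [hcons, List.map_cons]
    have e1 : ((b : Int) + 1) = ((b + 1 : Nat) : Int) := by push_cast; ring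
    have e2 : ((b : Int) + ((kn : Nat) + 1 : Nat)) = ((b + 1 : Nat) : Int) + ((kn : Nat) : Int) := by
      push_cast; ring
    rw [e1, e2, ih (b + 1) (by omega)]
    rw [PySem.List.pyGetD_natCast]
    rw [List.getD_eq_getElem?_getD, List.getElem?_eq_getElem hb]
    rw [List.drop_eq_getElem_cons hb, List.take_succ_cons]
    simp

-- A's row-major index enumeration of the window is the slice-of-slices, as one list
theorem pvWindowList {α : Type} (grid : List (List α)) (dflt : α) (a b kn : Nat)
    (hm : a + kn ≤ grid.length)
    (hrow : ∀ row ∈ grid, b + kn ≤ row.length) :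
    (PySem.List.pyRange (a : Int) ((a : Int) + (kn : Int)) 1).flatMap
      (fun x => (PySem.List.pyRange (b : Int) ((b : Int) + (kn : Int)) 1).map
        (fun y => PySem.List.pyGetD (PySem.List.pyGetD grid x []) y dflt))
      = ((grid.drop a).take kn).flatMap (fun r => (r.drop b).take kn) := by
  unfold List.flatMap
  congr 1
  rw [← pvSeg grid [] kn a hm, List.map_map]
  apply List.map_congr_left
  intro x hx
  have hxr := (PySem.List.mem_pyRange_one).mp hx
  have hkn : (a : Int) + (kn : Int) ≤ (grid.length : Int) := by exact_mod_cast Int.ofNat_le.mpr hm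
  have hlen : (0 : Int) ≤ x ∧ x < (grid.length : Int) := by omega
  have hr : PySem.List.pyGetD grid x [] ∈ grid := by
    apply PySem.List.pyGetD_mem
    simp [PySem.Raise.InRange]
    omega
  simp only [Function.comp]
  exact pvSeg _ dflt kn b (hrow _ hr)

-- A's window set is set(window multiset)
theorem pvAWindow_ofList (grid : List (List Int)) (i j k : Int) :
    pvAWindow grid i j k
      = PySem.Set.ofList ((PySem.List.pyRange i (i + k) 1).flatMap
          (fun x => (PySem.List.pyRange j (j + k) 1).map
            (fun y => PySem.List.pyGetD (PySem.List.pyGetD grid x []) y 0))) := by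
  rw [PySem.Set.ofList_eq_foldl, List.foldl_flatMap]
  unfold pvAWindow
  apply PySem.List.foldl_congr_mem
  intro acc x _
  rw [List.foldl_map]

-- B's set built by updating with row slices is set(flatMap of the slices)
theorem pvBVals (rows : List (List Int)) (f : List Int → List Int) :
    rows.foldl (fun s r => PySem.Set.update s (f r)) PySem.Set.empty
      = PySem.Set.ofList (rows.flatMap f) := by
  rw [PySem.Set.ofList_eq_foldl, List.foldl_flatMap]
  rfl

theorem pvMain (grid : List (List Int)) (k : Int) (hpre : Pre_minAbsDiff grid k) :
    minAbsDiff grid k = minAbsDiff_alt grid k := by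
  obtain ⟨hne, hk1, hrow⟩ := hpre
  unfold minAbsDiff minAbsDiff_alt
  simp only [PySem.List.len_eq]
  rw [PySem.List.foldl_append_singleton_eq_map, List.nil_append]
  apply List.map_congr_left
  intro i hi
  rw [PySem.List.foldl_append_singleton_eq_map, List.nil_append]
  apply List.map_congr_left
  intro j hj
  have hi' := (PySem.List.mem_pyRange_one).mp hi
  have hj' := (PySem.List.mem_pyRange_one).mp hj
  obtain ⟨a, rfl⟩ : ∃ a : Nat, i = (a : Int) := ⟨i.toNat, (Int.toNat_of_nonneg hi'.1).symm⟩
  obtain ⟨b, rfl⟩ : ∃ b : Nat, j = (b : Int) := ⟨j.toNat, (Int.toNat_of_nonneg hj'.1).symm⟩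
  obtain ⟨kn, rfl⟩ : ∃ kn : Nat, k = (kn : Int) := ⟨k.toNat, (Int.toNat_of_nonneg (by omega)).symm⟩
  have hm : a + kn ≤ grid.length := by
    have := hi'.2
    omega
  have hkm : (kn : Int) ≤ (grid.length : Int) := by omega
  have hkn : (kn : Int) ≤ ((grid.headD []).length : Int) := by
    have := hj'.2
    omega
  have hrow' : ∀ row ∈ grid, b + kn ≤ row.length := by
    intro row hr
    have h1 := hrow ⟨hkm, hkn⟩ row hr
    have := hj'.2
    omega
  -- identify both window multisets
  unfold pvCellB
  rw [pvBVals, PySem.List.slice_natCast_add]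
  have hslice : ∀ r ∈ (grid.drop a).take kn,
      PySem.List.slice r (some (b : Int)) (some ((b : Int) + (kn : Int))) = (r.drop b).take kn := by
    intro r _
    exact PySem.List.slice_natCast_add r b kn
  rw [List.flatMap_congr hslice]
  rw [← pvWindowList grid 0 a b kn hm hrow']
  rw [pvAWindow_ofList]
  set W := (PySem.List.pyRange (a : Int) ((a : Int) + (kn : Int)) 1).flatMap
      (fun x => (PySem.List.pyRange (b : Int) ((b : Int) + (kn : Int)) 1).map
        (fun y => PySem.List.pyGetD (PySem.List.pyGetD grid x []) y 0)) with hW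
  apply pvCore
  · intro x
    rw [PySem.List.mem_sorted, PySem.Set.mem_ofList]
  · exact PySem.List.sorted_ofList_pairwise_lt W

-- ===== VERDICT (by name: the statement is the Claim_ definition above) =====
theorem minAbsDiff_spec : Claim_equal_minAbsDiff := by
  intro grid k _ hpre
  unfold Spec_minAbsDiff
  exact pvMain grid k hpre
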